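-- pv_equiv track=rewrite | github.com/pypi-data/pypi-mirror-380 | packages/ferromic/ferromic-0.1.3.tar.gz/ferromic-0.1.3/cds/axt_to_phy.py | _chunk_plan
-- ===== SOURCE A (Python) =====
-- def _chunk_plan(file_size, n_workers):
--     # guard tiny chunks
--     base = max(1, file_size // n_workers)
--     offsets = []
--     start = 0
--     for i in range(n_workers):
--         end = file_size if i == n_workers - 1 else min(file_size, start + base)
--         offsets.append((start, end))
--         start = end
--     return offsets
-- ===== SOURCE B (Python) =====
-- def _chunk_plan(file_size, n_workers):
--     # guard tiny chunks
--     base = max(1, file_size // n_workers)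
--     last = n_workers - 1
--     return [(0 if i == 0 else min(file_size, i * base),
--              file_size if i == last else min(file_size, (i + 1) * base))
--             for i in range(n_workers)]
-- ===== Notes on version B (the rewrite author's own statement) =====
-- stated objective: alternative
-- what changed: Replaces the stateful loop threading a running `start` through an accumulator by a list comprehension that computes each chunk's boundaries in closed form from the index (start_i = min(file_size, i*base), last end forced to file_size).
import Mathlib
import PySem

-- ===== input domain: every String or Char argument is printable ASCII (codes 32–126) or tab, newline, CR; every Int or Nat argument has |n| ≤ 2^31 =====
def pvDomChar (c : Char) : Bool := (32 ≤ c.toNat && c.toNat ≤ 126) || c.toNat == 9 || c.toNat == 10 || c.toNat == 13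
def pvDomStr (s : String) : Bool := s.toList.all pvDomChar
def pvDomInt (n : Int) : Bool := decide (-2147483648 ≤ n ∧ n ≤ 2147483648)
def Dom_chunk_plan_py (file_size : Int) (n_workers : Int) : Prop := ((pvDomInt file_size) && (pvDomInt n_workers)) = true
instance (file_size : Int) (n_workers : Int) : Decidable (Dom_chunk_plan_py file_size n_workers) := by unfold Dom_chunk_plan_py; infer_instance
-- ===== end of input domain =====

-- B replaces the accumulator-threaded loop by a closed-form-per-index comprehension (alternative, same cost).


-- ===== PORT A =====
def chunk_plan_py (file_size : Int) (n_workers : Int) : List (Int × Int) :=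
  let base := max 1 (PySem.Int.floordiv file_size n_workers)
  let st := (PySem.List.pyRange 0 n_workers 1).foldl
    (fun (st : List (Int × Int) × Int) i =>
      let e := if i = n_workers - 1 then file_size else min file_size (st.2 + base)
      (st.1 ++ [(st.2, e)], e)) ([], 0)
  st.1

-- ===== PORT B =====
def chunk_plan_py_alt (file_size : Int) (n_workers : Int) : List (Int × Int) :=
  let base := max 1 (PySem.Int.floordiv file_size n_workers)
  let last := n_workers - 1
  (PySem.List.pyRange 0 n_workers 1).map (fun i =>
    (if i = 0 then 0 else min file_size (i * base),
     if i = last then file_size else min file_size ((i + 1) * base)))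

-- ===== PRECONDITION & SPEC =====
-- Pre_ excludes exactly n_workers = 0, where A raises ZeroDivisionError on file_size // n_workers.
def Pre_chunk_plan_py (file_size : Int) (n_workers : Int) : Prop := n_workers ≠ 0
instance (file_size : Int) (n_workers : Int) : Decidable (Pre_chunk_plan_py file_size n_workers) := by unfold Pre_chunk_plan_py; infer_instance
def pvWitness_chunk_plan_py : Int × Int := (10, 3)

def Spec_chunk_plan_py (file_size : Int) (n_workers : Int) (out : List (Int × Int)) : Prop := out = chunk_plan_py_alt file_size n_workers
instance (file_size : Int) (n_workers : Int) (out : List (Int × Int)) : Decidable (Spec_chunk_plan_py file_size n_workers out) := by unfold Spec_chunk_plan_py; infer_instance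

-- ===== CLAIM (what is proved, stated in full; the proofs are below) =====
def Claim_equal_chunk_plan_py : Prop := ∀ (file_size : Int) (n_workers : Int), Dom_chunk_plan_py file_size n_workers → Pre_chunk_plan_py file_size n_workers → Spec_chunk_plan_py file_size n_workers (chunk_plan_py file_size n_workers)

-- ===== LEMMAS AND PROOFS =====

-- closed form for the running `start` of A's loop
def pvStart (fs base i : Int) : Int := if i = 0 then 0 else min fs (i * base)

-- the arithmetic heart: one step of A's accumulator advances the closed form
theorem pvStart_step (fs base i : Int) (hb : 1 ≤ base) (hi : 0 ≤ i) :
    min fs (pvStart fs base i + base) = pvStart fs base (i + 1) := by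
  unfold pvStart
  rcases eq_or_lt_of_le hi with h0 | hpos
  · simp [← h0]
  · have hne : i ≠ 0 := by omega
    have hne' : i + 1 ≠ 0 := by omega
    have hmul : (i + 1) * base = i * base + base := by ring
    have hib : 0 ≤ i * base := by positivity
    simp only [if_neg hne, if_neg hne', hmul]
    omega

-- A's fold over a proper prefix of the range computes B's closed form
theorem pvPrefix (fs n base : Int) (hb : 1 ≤ base) :
    ∀ (m : Int), 0 ≤ m → m ≤ n - 1 →
      (PySem.List.pyRange 0 m 1).foldl
        (fun (st : List (Int × Int) × Int) i =>
          let e := if i = n - 1 then fs else min fs (st.2 + base)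
          (st.1 ++ [(st.2, e)], e)) ([], 0)
      = ((PySem.List.pyRange 0 m 1).map (fun i => (pvStart fs base i, pvStart fs base (i + 1))),
         pvStart fs base m) := by
  intro m hm
  induction m, hm using Int.le_induction with
  | base => intro _; simp [pvStart]
  | succ m hm ih =>
    intro hlt
    have hpref := ih (by omega)
    rw [PySem.List.pyRange_one_succ_right (by omega), List.foldl_append, hpref,
        List.map_append]
    have hne : m ≠ n - 1 := by omega
    simp only [List.foldl_cons, List.foldl_nil, if_neg hne, List.map_cons, List.map_nil]
    rw [pvStart_step fs base m hb hm]

theorem chunk_plan_eq (fs n : Int) (_hn : n ≠ 0) :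
    chunk_plan_py fs n = chunk_plan_py_alt fs n := by
  unfold chunk_plan_py chunk_plan_py_alt
  dsimp only
  set base := max 1 (PySem.Int.floordiv fs n) with hbase
  have hb : 1 ≤ base := le_max_left _ _
  by_cases hneg : n ≤ 0
  · rw [PySem.List.pyRange_one_eq_nil (by omega)]; simp
  · -- split off the last index n-1
    have hsplit : PySem.List.pyRange 0 n 1 = PySem.List.pyRange 0 (n - 1) 1 ++ [n - 1] := by
      have := PySem.List.pyRange_one_succ_right (a := 0) (b := n - 1) (by omega)
      simpa using this
    rw [hsplit, List.foldl_append, pvPrefix fs n base hb (n - 1) (by omega) le_rfl,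
        List.map_append]
    simp only [List.foldl_cons, List.foldl_nil, List.map_cons, List.map_nil]
    refine congrArg₂ (· ++ ·) ?_ ?_
    · -- prefix entries agree (i ≠ n-1 there)
      apply List.map_congr_left
      intro i hi
      have hi' := (PySem.List.mem_pyRange_one).1 hi
      have hne : i ≠ n - 1 := by omega
      have hne0 : i + 1 ≠ 0 := by omega
      simp [if_neg hne, pvStart, if_neg hne0]
    · simp [pvStart]

-- ===== VERDICT (by name: the statement is the Claim_ definition above) =====
theorem chunk_plan_py_spec : Claim_equal_chunk_plan_py := by
  intro fs n _ hn
  unfold Spec_chunk_plan_py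
  exact chunk_plan_eq fs n hn
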